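-- pv_equiv track=rewrite | github.com/jiyoungzero/codetree-TILs | 231128/아름다운 수/beautiful-number.py | beautiful
-- ===== SOURCE A (Python) =====
-- def beautiful(num):
--     for i in range(len(num)):
--         target = num[i]
--         cnt = 0
--         for j in range(i, len(num)):
--             if num[j] == target:
--                 cnt += 1
--             else:break
--         if cnt % target != 1:
--             return False
--     return True
-- ===== SOURCE B (Python) =====
-- def beautiful(num):
--     # A's check passes at every index iff every element exceeds 1 and no two
--     # adjacent elements are equal (a run of length >= 2 always fails somewhere).
--     return all(v > 1 for v in num) and all(a != b for a, b in zip(num, num[1:]))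
-- ===== Notes on version B (the rewrite author's own statement) =====
-- stated objective: simpler
-- what changed: Replaced A's nested index loops (re-counting the equal-run at every index and testing cnt % num[i] == 1) by two linear whole-list scans: every element > 1 and no two adjacent elements equal, which is provably the exact same predicate.
-- crash fix: A raises ZeroDivisionError exactly when the list contains a 0 whose preceding prefix passes all of A's checks (all entries > 1, adjacent entries distinct); B returns False there. — e.g. on beautiful([0]): A raises ZeroDivisionError, B returns false
import Mathlib
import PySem

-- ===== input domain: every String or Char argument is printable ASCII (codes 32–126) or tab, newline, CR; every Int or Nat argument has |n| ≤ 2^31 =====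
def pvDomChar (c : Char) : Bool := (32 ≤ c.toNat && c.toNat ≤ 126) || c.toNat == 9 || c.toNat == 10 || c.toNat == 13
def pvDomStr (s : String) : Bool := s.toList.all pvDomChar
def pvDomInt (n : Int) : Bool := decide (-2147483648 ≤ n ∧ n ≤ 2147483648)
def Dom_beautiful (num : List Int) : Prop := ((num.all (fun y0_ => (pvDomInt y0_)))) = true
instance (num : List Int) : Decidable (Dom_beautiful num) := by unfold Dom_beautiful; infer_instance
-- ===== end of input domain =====

-- B replaces A's nested index loops by two linear scans (all elements > 1, no equal
-- adjacent pair); objective: simpler. Equivalence is about the return value; A mutates nothing.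

-- ===== PORT A =====
-- inner 'for j in range(i, len(num))' loop with its break
def innerA (num : List Int) (target : Int) (j : Nat) (cnt : Int) : Int :=
  if h : j < num.length then
    if num[j] = target then innerA num target (j + 1) (cnt + 1) else cnt
  else cnt
termination_by num.length - j

-- outer 'for i in range(len(num))' loop with its early 'return False'
def outerA (num : List Int) (i : Nat) : Bool :=
  if h : i < num.length then
    let target := num[i]
    let cnt := innerA num target i 0
    if PySem.Int.mod cnt target ≠ 1 then false
    else outerA num (i + 1)
  else true
termination_by num.length - i

def beautiful (num : List Int) : Bool := outerA num 0

-- ===== PORT B =====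
def beautiful_alt (num : List Int) : Bool :=
  num.all (fun v => decide (1 < v)) &&
    (num.zip (num.drop 1)).all (fun p => decide (p.1 ≠ p.2))

-- ===== PRECONDITION & SPEC =====
-- helper for Pre_: a prefix on which every per-index check of A passes
def goodR : List Int → Bool
  | [] => true
  | v :: xs =>
      decide (1 < v) && (match xs with | [] => true | y :: _ => decide (v ≠ y)) && goodR xs

-- Pre_ excludes exactly the inputs where A raises ZeroDivisionError: a 0 entry whose
-- preceding prefix passes all of A's checks (all entries > 1, adjacent entries distinct).
def Pre_beautiful (num : List Int) : Prop :=
  ¬ ∃ i : Fin num.length, num[i.1]'i.2 = 0 ∧ goodR (num.take i.1) = true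
instance (num : List Int) : Decidable (Pre_beautiful num) := by
  unfold Pre_beautiful; infer_instance

def pvWitness_beautiful : List Int := ([2, 3, 2])

-- A raises ZeroDivisionError exactly when the list contains a 0 whose preceding prefix
-- passes all of A's checks; B returns false there.
def Raises_beautiful (num : List Int) : Prop :=
  ∃ i : Fin num.length, num[i.1]'i.2 = 0 ∧ goodR (num.take i.1) = true
instance (num : List Int) : Decidable (Raises_beautiful num) := by
  unfold Raises_beautiful; infer_instance
def pvRaiseWitness_beautiful : List Int := ([0])
def pvRaiseWitnessOut_beautiful : Bool := false

def Spec_beautiful (num : List Int) (out : Bool) : Prop := out = beautiful_alt num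
instance (num : List Int) (out : Bool) : Decidable (Spec_beautiful num out) := by
  unfold Spec_beautiful; infer_instance

-- ===== CLAIM (what is proved, stated in full; the proofs are below) =====
def Claim_equal_beautiful : Prop :=
  ∀ (num : List Int), Dom_beautiful num → Pre_beautiful num →
    Spec_beautiful num (beautiful num)
def Claim_raises_beautiful : Prop :=
  (∀ (num : List Int), Dom_beautiful num → Raises_beautiful num → ¬ Pre_beautiful num) ∧
    (Dom_beautiful (pvRaiseWitness_beautiful) ∧ Raises_beautiful (pvRaiseWitness_beautiful) ∧
      beautiful_alt (pvRaiseWitness_beautiful) = pvRaiseWitnessOut_beautiful)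

-- ===== LEMMAS AND PROOFS =====
-- length of the run of copies of v at the head of the list
def runLen : List Int → Int → Nat
  | [], _ => 0
  | x :: xs, v => if x = v then runLen xs v + 1 else 0

theorem innerA_eq (num : List Int) (v : Int) :
    ∀ j c, innerA num v j c = c + (runLen (num.drop j) v : Int) := by
  have key : ∀ n j c, num.length - j ≤ n →
      innerA num v j c = c + (runLen (num.drop j) v : Int) := by
    intro n
    induction n with
    | zero =>
      intro j c hle
      rw [innerA]
      have hj : ¬ j < num.length := by omega
      rw [List.drop_eq_nil_of_le (Nat.le_of_not_lt hj)]
      simp [hj, runLen]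
    | succ n ih =>
      intro j c hle
      rw [innerA]
      by_cases hj : j < num.length
      · rw [List.drop_eq_getElem_cons hj]
        by_cases he : num[j] = v
        · simp only [hj, dif_pos, he, if_pos, runLen]
          rw [ih (j + 1) (c + 1) (by omega)]
          push_cast; ring
        · simp [hj, he, runLen]
      · rw [List.drop_eq_nil_of_le (Nat.le_of_not_lt hj)]
        simp [hj, runLen]
  exact fun j c => key (num.length - j) j c le_rfl

-- A's outer loop, listified
def bAux : List Int → Bool
  | [] => true
  | v :: xs =>
      if PySem.Int.mod (1 + (runLen xs v : Int)) v ≠ 1 then false else bAux xs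

theorem outerA_eq (num : List Int) :
    ∀ i, outerA num i = bAux (num.drop i) := by
  have key : ∀ n i, num.length - i ≤ n → outerA num i = bAux (num.drop i) := by
    intro n
    induction n with
    | zero =>
      intro i hle
      rw [outerA]
      have hi : ¬ i < num.length := by omega
      rw [List.drop_eq_nil_of_le (Nat.le_of_not_lt hi)]
      simp [hi, bAux]
    | succ n ih =>
      intro i hle
      rw [outerA]
      by_cases hi : i < num.length
      · rw [List.drop_eq_getElem_cons hi]
        have hinner : innerA num num[i] i 0
            = 1 + (runLen (num.drop (i + 1)) num[i] : Int) := by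
          rw [innerA_eq, List.drop_eq_getElem_cons hi]
          simp [runLen]; ring
        simp only [hi, dif_pos, bAux, hinner]
        by_cases hm : PySem.Int.mod (1 + (runLen (num.drop (i + 1)) num[i] : Int)) num[i] ≠ 1
        · simp [hm]
        · simp [hm, ih (i + 1) (by omega)]
      · rw [List.drop_eq_nil_of_le (Nat.le_of_not_lt hi)]
        simp [hi, bAux]
  exact fun i => key (num.length - i) i le_rfl

theorem alt_eq_goodR : ∀ l : List Int, beautiful_alt l = goodR l := by
  intro l
  induction l with
  | nil => rfl
  | cons v xs ih =>
    cases xs with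
    | nil => simp [beautiful_alt, goodR]
    | cons y ys =>
      simp only [beautiful_alt, goodR, List.drop_one, List.tail_cons, List.zip_cons_cons,
        List.all_cons] at *
      rw [← ih]
      cases h1 : decide (1 < v) <;> cases h2 : decide (v ≠ y) <;> simp

theorem mod_one_of_one_lt (v : Int) (hv : 1 < v) : PySem.Int.mod 1 v = 1 := by
  rw [PySem.Int.mod_eq_emod_of_pos (by omega)]
  exact Int.emod_eq_of_lt (by norm_num) hv

theorem one_lt_of_mod_eq_one (c v : Int) (hv : v ≠ 0)
    (h : PySem.Int.mod c v = 1) : 1 < v := by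
  rcases lt_or_gt_of_ne hv with hneg | hpos
  · have := PySem.Int.mod_neg_bounds (a := c) hneg
    omega
  · have := PySem.Int.mod_lt (a := c) hpos
    omega

theorem mod_two_ne_one (v : Int) (hv : 1 < v) : PySem.Int.mod 2 v ≠ 1 := by
  rw [PySem.Int.mod_eq_emod_of_pos (by omega)]
  rcases (by omega : v = 2 ∨ 2 < v) with h2 | h2
  · rw [h2]; decide
  · rw [Int.emod_eq_of_lt (by norm_num) h2]; norm_num

theorem runLen_pos (l : List Int) (v : Int) (h : 0 < runLen l v) : ∃ t, l = v :: t := by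
  cases l with
  | nil => simp [runLen] at h
  | cons x t =>
    by_cases hx : x = v
    · exact ⟨t, by rw [hx]⟩
    · simp [runLen, hx] at h

theorem goodR_cons_cons (v y : Int) (ys : List Int) :
    goodR (v :: y :: ys) = (decide (1 < v) && decide (v ≠ y) && goodR (y :: ys)) := rfl

theorem pre_vv (v : Int) (zs : List Int) (hv : 1 < v) :
    Pre_beautiful (v :: v :: zs) := by
  rintro ⟨⟨i, hi⟩, hz, hg⟩
  match i with
  | 0 => simp at hz; omega
  | 1 => simp at hz; omega
  | (i + 2) =>
    rw [List.take_succ_cons, List.take_succ_cons, goodR_cons_cons] at hg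
    simp at hg

theorem pre_tail (v y : Int) (ys : List Int) (hv : 1 < v) (hvy : v ≠ y)
    (hp : Pre_beautiful (v :: y :: ys)) : Pre_beautiful (y :: ys) := by
  rintro ⟨⟨i, hi⟩, hz, hg⟩
  apply hp
  refine ⟨⟨i + 1, by simpa using Nat.succ_lt_succ hi⟩, ?_, ?_⟩
  · simpa using hz
  · rw [List.take_succ_cons]
    cases i with
    | zero => simp [goodR, hv]
    | succ i =>
      rw [List.take_succ_cons] at hg ⊢
      rw [goodR_cons_cons]
      simp [hv, hvy, hg]

theorem main_eq : ∀ l : List Int, Pre_beautiful l → bAux l = goodR l := by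
  intro l
  induction l with
  | nil => intro _; rfl
  | cons v xs ih =>
    intro hpre
    by_cases hm : PySem.Int.mod (1 + (runLen xs v : Int)) v = 1
    · have hv0 : v ≠ 0 := by
        intro h0
        exact hpre ⟨⟨0, by simp⟩, by simpa using h0, by simp [List.take_zero, goodR]⟩
      have hv : 1 < v := one_lt_of_mod_eq_one _ _ hv0 hm
      have hb : bAux (v :: xs) = bAux xs := by simp [bAux, hm]
      cases xs with
      | nil => simp [bAux, goodR, hv, mod_one_of_one_lt v hv]
      | cons y ys =>
        by_cases hvy : y = v
        · subst hvy
          have hpos : 0 < runLen ys y := by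
            by_contra hpos
            have h0 : runLen ys y = 0 := by omega
            have h2 : (1 + (runLen (y :: ys) y : Int)) = 2 := by simp [runLen, h0]
            rw [h2] at hm
            exact mod_two_ne_one y hv hm
          obtain ⟨zs, hzs⟩ := runLen_pos ys y hpos
          have hxpre : Pre_beautiful (y :: ys) := by rw [hzs]; exact pre_vv y zs hv
          rw [hb, ih hxpre, hzs, goodR_cons_cons, goodR_cons_cons]
          simp
        · have hvy' : v ≠ y := fun h => hvy h.symm
          have hxpre : Pre_beautiful (y :: ys) := pre_tail v y ys hv hvy' hpre
          rw [hb, ih hxpre, goodR_cons_cons]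
          simp [hv, hvy']
    · -- the first check fails: A returns false, and B is false as well
      have hb : bAux (v :: xs) = false := by simp [bAux, hm]
      rw [hb]
      cases hgd : goodR (v :: xs) with
      | false => rfl
      | true =>
        exfalso
        have hv : 1 < v := by
          cases xs <;> simp [goodR] at hgd <;> tauto
        have hrun : runLen xs v = 0 := by
          cases xs with
          | nil => rfl
          | cons y ys =>
            rw [goodR_cons_cons] at hgd
            simp at hgd
            have hyv : ¬ y = v := fun h => hgd.1.2 h.symm
            simp [runLen, hyv]
        rw [hrun] at hm
        exact hm (by simpa using mod_one_of_one_lt v hv)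

-- ===== VERDICT (by name: the statement is the Claim_ definition above) =====
theorem beautiful_spec : Claim_equal_beautiful := by
  intro num _ hpre
  unfold Spec_beautiful
  rw [alt_eq_goodR, ← main_eq num hpre]
  show outerA num 0 = bAux num
  rw [outerA_eq num 0, List.drop_zero]

theorem beautiful_raises : Claim_raises_beautiful := by
  unfold Claim_raises_beautiful
  exact ⟨fun num _ hr hp => hp hr, by decide⟩

-- self-check that the raise witness really lies in the stated raise region
theorem pvRaiseWitness_beautiful_ok :
    Raises_beautiful (pvRaiseWitness_beautiful) := beautiful_raises.2.2.1
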